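-- pv_equiv track=rewrite | github.com/seongpyoHong/algorithm | Programmers/비밀지도.py | find_secret_map
-- ===== SOURCE A (Python) =====
-- def find_secret_map(str1, str2) :
--     ret = ""
--     for i in range(0, len(str1)):
--         if (str1[i] == "#" or str2[i] == "#"):
--             ret += "#"
--         else :
--             ret += " "
--     return ret
-- ===== SOURCE B (Python) =====
-- def find_secret_map(str1, str2):
--     n = len(str1)
--     a = 0
--     for c in str1:
--         a = a * 2 + (c == '#')
--     b = 0
--     for c in str2[:n].ljust(n):
--         b = b * 2 + (c == '#')
--     x = a | b
--     out = []
--     for _ in range(n):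
--         out.append('#' if x % 2 else ' ')
--         x //= 2
--     out.reverse()
--     return ''.join(out)
-- ===== Notes on version B (the rewrite author's own statement) =====
-- stated objective: alternative
-- what changed: Replaces the per-index character-comparison loop by packing each mask string into an integer (reading '#' as bit 1, a short str2 padded with blanks), bitwise-OR-ing the two integers, and unpacking the result into '#'/' ' characters by repeated division.
import Mathlib
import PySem

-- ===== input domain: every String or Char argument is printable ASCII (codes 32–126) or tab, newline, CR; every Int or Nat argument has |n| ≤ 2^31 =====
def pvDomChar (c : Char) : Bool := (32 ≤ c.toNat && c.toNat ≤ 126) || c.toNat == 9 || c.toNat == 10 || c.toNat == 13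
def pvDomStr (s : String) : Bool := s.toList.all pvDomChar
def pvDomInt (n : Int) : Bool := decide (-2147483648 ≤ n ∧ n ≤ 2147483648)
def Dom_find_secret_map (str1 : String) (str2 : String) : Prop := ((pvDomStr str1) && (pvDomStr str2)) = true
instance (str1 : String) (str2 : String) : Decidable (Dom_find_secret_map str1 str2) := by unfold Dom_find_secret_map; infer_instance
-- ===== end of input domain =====

-- B replaces the per-index character comparison by packing each mask into an integer ('#' = bit 1,
-- a short str2 padded with blanks), bitwise-OR-ing, and unpacking the bits back to '#'/' '
-- characters (alternative algorithm, same cost).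

-- ===== PORT A =====
def find_secret_map (str1 : String) (str2 : String) : String :=
  String.ofList ((PySem.List.pyRange 0 (str1.toList.length : Int) 1).foldl
    (fun ret i =>
      ret ++ (if PySem.List.pyGetD str1.toList i ' ' == '#' || PySem.List.pyGetD str2.toList i ' ' == '#'
              then ['#'] else [' '])) [])

-- ===== PORT B =====
-- a = 0; for c in s: a = a*2 + (c == '#')
def pvEnc (s : List Char) : Int :=
  s.foldl (fun a c => a * 2 + (if c == '#' then 1 else 0)) 0

-- str2[:n].ljust(n) : take the prefix, pad on the right with spaces up to length n
def pvLjust (s : List Char) (n : Nat) : List Char :=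
  s ++ List.replicate (n - s.length) ' '

def find_secret_map_alt (str1 : String) (str2 : String) : String :=
  let n := str1.toList.length
  let a := pvEnc str1.toList
  let b := pvEnc (pvLjust (PySem.List.slice str2.toList none (some (n : Int))) n)
  let res := (List.range n).foldl
    (fun (st : Int × List Char) _ =>
      (PySem.Int.floordiv st.1 2,
       st.2 ++ [if PySem.Int.mod st.1 2 ≠ 0 then '#' else ' ']))
    (PySem.Int.bor a b, [])
  String.ofList res.2.reverse

-- ===== PRECONDITION & SPEC =====
-- A indexes str2[i] only when str1[i] != '#' (short-circuit 'or'); Pre_ excludes exactly the inputs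
-- where some such index falls beyond str2, i.e. exactly where the Python A raises IndexError.
def Pre_find_secret_map (str1 : String) (str2 : String) : Prop :=
  ∀ i, i < str1.toList.length → i < str2.toList.length ∨ str1.toList.getD i ' ' = '#'
instance (str1 : String) (str2 : String) : Decidable (Pre_find_secret_map str1 str2) := by
  unfold Pre_find_secret_map; infer_instance

def pvWitness_find_secret_map : String × String := ("# x", " #yz")

def Spec_find_secret_map (str1 : String) (str2 : String) (out : String) : Prop :=
  out = find_secret_map_alt str1 str2
instance (str1 : String) (str2 : String) (out : String) : Decidable (Spec_find_secret_map str1 str2 out) := by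
  unfold Spec_find_secret_map; infer_instance

-- ===== CLAIM (what is proved, stated in full; the proofs are below) =====
def Claim_equal_find_secret_map : Prop := ∀ (str1 : String) (str2 : String), Dom_find_secret_map str1 str2 → Pre_find_secret_map str1 str2 → Spec_find_secret_map str1 str2 (find_secret_map str1 str2)


-- ===== LEMMAS AND PROOFS =====

-- the encoding on the Nat side
def pvEncN (bs : List Bool) : Nat :=
  bs.foldl (fun a b => 2 * a + b.toNat) 0

lemma pvEnc_aux (cs : List Char) (a : Nat) :
    cs.foldl (fun a c => a * 2 + (if c == '#' then 1 else 0)) ((a : Nat) : Int)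
      = (((cs.map (· == '#')).foldl (fun a b => 2 * a + b.toNat) a : Nat) : Int) := by
  induction cs generalizing a with
  | nil => simp
  | cons c cs ih =>
    simp only [List.foldl_cons, List.map_cons]
    have h : ((a : Nat) : Int) * 2 + (if c == '#' then 1 else 0)
        = (((2 * a + (c == '#').toNat : Nat) : Nat) : Int) := by
      by_cases hc : c = '#'
      · simp [hc]; ring
      · have hb : (c == '#') = false := by simp [hc]
        simp [hb]; ring
    rw [h, ih]

lemma pvEnc_eq_encN (cs : List Char) :
    pvEnc cs = ((pvEncN (cs.map (· == '#')) : Nat) : Int) := by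
  unfold pvEnc pvEncN
  exact_mod_cast pvEnc_aux cs 0

lemma pvEncN_concat (bs : List Bool) (b : Bool) :
    pvEncN (bs.concat b) = Nat.bit b (pvEncN bs) := by
  simp [pvEncN, Nat.bit_val]

-- the B decode loop ignores the range elements: it is an iterate
lemma pv_foldl_const {α β : Type} (g : α → α) (l : List β) (init : α) :
    l.foldl (fun s _ => g s) init = g^[l.length] init := by
  induction l generalizing init with
  | nil => rfl
  | cons x l ih => simp [List.foldl_cons, ih, Function.iterate_succ_apply]

def pvStep (st : Int × List Char) : Int × List Char :=
  (PySem.Int.floordiv st.1 2,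
   st.2 ++ [if PySem.Int.mod st.1 2 ≠ 0 then '#' else ' '])

def pvCh (a b : Bool) : Char := if a || b then '#' else ' '

lemma pv_decode (xs ys : List Bool) (h : xs.length = ys.length) (acc : List Char) :
    pvStep^[xs.length] (((pvEncN xs ||| pvEncN ys : Nat) : Int), acc)
      = (0, acc ++ (List.zipWith pvCh xs ys).reverse) := by
  induction xs using List.reverseRecOn generalizing ys acc with
  | nil =>
    have : ys = [] := List.eq_nil_of_length_eq_zero h.symm
    subst this; simp
  | append_singleton l x ih =>
    rcases List.eq_nil_or_concat ys with rfl | ⟨L, y, rfl⟩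
    · simp at h
    · simp only [List.concat_eq_append] at h ⊢
      have hlen : l.length = L.length := by
        have := h; simp at this; omega
      have hbit : (pvEncN (l ++ [x]) ||| pvEncN (L ++ [y]))
          = Nat.bit (x || y) (pvEncN l ||| pvEncN L) := by
        rw [← List.concat_eq_append, ← List.concat_eq_append,
            pvEncN_concat, pvEncN_concat, Nat.lor_bit]
      have hstep : pvStep (((pvEncN (l ++ [x]) ||| pvEncN (L ++ [y]) : Nat) : Int), acc)
          = (((pvEncN l ||| pvEncN L : Nat) : Int), acc ++ [pvCh x y]) := by
        rw [hbit]
        set c := x || y with hc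
        set w := pvEncN l ||| pvEncN L with hw
        have hdiv : PySem.Int.floordiv ((Nat.bit c w : Nat) : Int) 2
            = (((Nat.bit c w / 2 : Nat) : Nat) : Int) := by
          exact_mod_cast PySem.Int.floordiv_natCast (Nat.bit c w) 2
        have hmod : PySem.Int.mod ((Nat.bit c w : Nat) : Int) 2
            = (((Nat.bit c w % 2 : Nat) : Nat) : Int) := by
          exact_mod_cast PySem.Int.mod_natCast (Nat.bit c w) 2
        have hbv : Nat.bit c w = 2 * w + c.toNat := Nat.bit_val c w
        have hd2 : Nat.bit c w / 2 = w := by cases c <;> simp [Nat.bit_val]; omega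
        have hm2 : Nat.bit c w % 2 = c.toNat := by cases c <;> simp [Nat.bit_val] <;> omega
        simp only [pvStep, hdiv, hmod, hd2, hm2]
        rw [hc]
        cases x <;> cases y <;> simp [pvCh]
      have hl1 : (l ++ [x]).length = l.length + 1 := by simp
      rw [hl1, Function.iterate_succ_apply, hstep, ih L hlen]
      rw [List.zipWith_append hlen]
      simp [pvCh]

theorem pv_main (str1 str2 : String) (h : Pre_find_secret_map str1 str2) :
    find_secret_map str1 str2 = find_secret_map_alt str1 str2 := by
  unfold Pre_find_secret_map at h
  set s1 := str1.toList with hs1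
  set s2 := str2.toList with hs2
  set n := s1.length with hn
  -- A side
  have hA : find_secret_map str1 str2
      = String.ofList ((List.range n).map (fun k =>
          if s1.getD k ' ' == '#' || s2.getD k ' ' == '#' then '#' else ' ')) := by
    unfold find_secret_map
    congr 1
    have hfun : (fun (ret : List Char) (i : Int) =>
        ret ++ (if PySem.List.pyGetD s1 i ' ' == '#' || PySem.List.pyGetD s2 i ' ' == '#'
                then ['#'] else [' ']))
        = fun ret i => ret ++ [if PySem.List.pyGetD s1 i ' ' == '#' || PySem.List.pyGetD s2 i ' ' == '#'
                then '#' else ' '] := by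
      funext ret i; split <;> simp_all
    rw [hfun, PySem.List.foldl_append_singleton_eq_map, PySem.List.pyRange_one]
    have hlen1 : str1.length = n := by rw [hn, hs1]; exact String.length_toList.symm
    simp [List.map_map, Function.comp_def, hlen1]
  -- B side
  have hfold : ∀ (v : Int), (List.range n).foldl
      (fun (st : Int × List Char) _ =>
        (PySem.Int.floordiv st.1 2,
         st.2 ++ [if PySem.Int.mod st.1 2 ≠ 0 then '#' else ' '])) (v, [])
      = pvStep^[n] (v, []) := by
    intro v
    have := pv_foldl_const pvStep (List.range n) ((v, []) : Int × List Char)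
    simpa [pvStep] using this
  set xs := s1.map (· == '#') with hxs
  set ys := (pvLjust (s2.take n) n).map (· == '#') with hys
  have htlen : (s2.take n).length = min n s2.length := by simp
  have hxlen : xs.length = n := by rw [hxs]; simp only [List.length_map]; exact hn.symm
  have hylen : ys.length = n := by
    rw [hys]; simp only [pvLjust, List.length_map, List.length_append, List.length_replicate]
    omega
  have hB : find_secret_map_alt str1 str2
      = String.ofList (List.zipWith pvCh xs ys) := by
    unfold find_secret_map_alt
    simp only [← hs1, ← hs2, ← hn]
    rw [PySem.List.slice_to_natCast]
    rw [pvEnc_eq_encN, pvEnc_eq_encN, ← hxs, ← hys]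
    rw [PySem.Int.bor_natCast, hfold]
    have := pv_decode xs ys (by omega) []
    rw [hxlen] at this
    rw [this]
    simp
  rw [hA, hB]
  congr 1
  apply List.ext_getElem
  · simp only [List.length_map, List.length_range, List.length_zipWith]
    omega
  · intro k hk1 hk2
    have hkn : k < n := by simpa using hk1
    simp only [List.getElem_map, List.getElem_range, List.getElem_zipWith, hxs, hys, pvLjust]
    by_cases hk2' : k < s2.length
    · have hkt : k < (s2.take n).length := by omega
      rw [List.getElem_append_left hkt]
      simp only [List.getElem_take]
      rw [List.getD_eq_getElem s1 ' ' (by omega), List.getD_eq_getElem s2 ' ' hk2']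
      simp [pvCh]
    · -- k beyond str2: Pre_ forces str1[k] = '#'
      have h1 : s1.getD k ' ' = '#' := by
        rcases h k hkn with h' | h'
        · omega
        · exact h'
      have hkt : ¬ k < (s2.take n).length := by omega
      rw [List.getElem_append_right (by omega)]
      simp only [List.getElem_replicate]
      have h1g : s1[k] = '#' := by
        rw [List.getD_eq_getElem s1 ' ' (by omega)] at h1; exact h1
      rw [List.getD_eq_getElem s1 ' ' (by omega)]
      simp [h1g, pvCh]

-- ===== VERDICT (by name: the statement is the Claim_ definition above) =====
theorem find_secret_map_spec : Claim_equal_find_secret_map := by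
  intro str1 str2 _ hpre
  exact pv_main str1 str2 hpre
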